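-- pv_equiv track=rewrite | github.com/arnodeceuninck/CLizard | grammar/htmlToJson.py | addJsonStr
-- ===== SOURCE A (Python) =====
-- charactersToEscape = ["\"", "\\"]  # A list of all characters that need an \ in front of them in json
--
-- def addJsonStr(variable):
--     string = "\""
--     for char in variable:
--         if char in charactersToEscape:
--             string += "\\"
--         string += char
--     string += "\"" + ", "
--     return string
-- ===== SOURCE B (Python) =====
-- def addJsonStr(variable):
--     return '"' + variable.replace('\\', '\\\\').replace('"', '\\"') + '"' + ', '
-- ===== Notes on version B (the rewrite author's own statement) =====
-- stated objective: faster
-- what changed: Replaces the per-character membership loop with string accumulator by a single expression of two ordered whole-string replace passes (backslashes doubled first, then quotes escaped), done in C by str.replace.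
import Mathlib
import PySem

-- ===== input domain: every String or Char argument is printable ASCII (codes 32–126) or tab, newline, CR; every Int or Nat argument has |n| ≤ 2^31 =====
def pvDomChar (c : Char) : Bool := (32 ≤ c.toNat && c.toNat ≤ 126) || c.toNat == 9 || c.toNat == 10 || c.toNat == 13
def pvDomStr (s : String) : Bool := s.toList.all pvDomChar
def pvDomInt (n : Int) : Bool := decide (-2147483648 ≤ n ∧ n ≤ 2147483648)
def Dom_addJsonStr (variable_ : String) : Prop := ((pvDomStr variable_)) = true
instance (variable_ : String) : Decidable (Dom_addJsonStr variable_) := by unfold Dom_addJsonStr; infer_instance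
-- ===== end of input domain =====

-- B replaces A's per-character membership loop with two ordered whole-string replace passes (idiomatic; return value identical).

-- ===== PORT A =====
-- charactersToEscape = ["\"", "\\"]  (one-character strings ported as Chars)
def charactersToEscape : List Char := ['"', '\\']

def addJsonStr (variable_ : String) : String :=
  String.ofList
    ((variable_.toList.foldl
        (fun s c => (if c ∈ charactersToEscape then s ++ ['\\'] else s) ++ [c])
        ['"']) ++ ['"'] ++ [',', ' '])

-- ===== PORT B =====
def addJsonStr_alt (variable_ : String) : String :=
  "\"" ++ PySem.Str.replace (PySem.Str.replace variable_ "\\" "\\\\") "\"" "\\\"" ++ "\"" ++ ", "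

-- ===== PRECONDITION & SPEC =====
def Spec_addJsonStr (variable_ : String) (out : String) : Prop := out = addJsonStr_alt variable_
instance (variable_ : String) (out : String) : Decidable (Spec_addJsonStr variable_ out) := by unfold Spec_addJsonStr; infer_instance

-- ===== CLAIM (what is proved, stated in full; the proofs are below) =====
def Claim_equal_addJsonStr : Prop := ∀ (variable_ : String), Dom_addJsonStr variable_ → Spec_addJsonStr variable_ (addJsonStr variable_)

-- ===== LEMMAS AND PROOFS =====

-- replace with a one-character pattern is a per-character flatMap
theorem replace_go_single (a : Char) (new : List Char) :
    ∀ (l : List Char) (fuel : Nat) (acc : List Char), l.length ≤ fuel →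
      PySem.Chars.replace.go [a] new fuel l acc
        = acc.reverse ++ l.flatMap (fun c => if c = a then new else [c]) := by
  intro l
  induction l with
  | nil =>
      intro fuel acc _
      cases fuel <;> simp [PySem.Chars.replace.go]
  | cons c t ih =>
      intro fuel acc h
      cases fuel with
      | zero => simp at h
      | succ n =>
        by_cases hc : c = a
        · subst hc
          have : List.isPrefixOf [c] (c :: t) = true := by simp [List.isPrefixOf]
          simp only [PySem.Chars.replace.go, this, if_pos]
          rw [show List.drop [c].length (c :: t) = t from rfl]
          rw [ih _ _ (by simpa using Nat.le_of_succ_le_succ h)]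
          simp
        · have : List.isPrefixOf [a] (c :: t) = false := by
            simp [List.isPrefixOf]; exact fun h' => (hc h'.symm).elim
          simp only [PySem.Chars.replace.go, this]
          rw [ih _ _ (Nat.le_of_succ_le_succ h)]
          simp [hc]

theorem replace_single (a : Char) (new : List Char) (l : List Char) :
    PySem.Chars.replace l [a] new = l.flatMap (fun c => if c = a then new else [c]) := by
  simp [PySem.Chars.replace]
  simpa using replace_go_single a new l l.length [] (Nat.le_refl _)

theorem foldl_escape (l : List Char) (init : List Char) :
    l.foldl (fun s c => (if c ∈ charactersToEscape then s ++ ['\\'] else s) ++ [c]) init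
      = init ++ l.flatMap (fun c => if c ∈ charactersToEscape then ['\\', c] else [c]) := by
  induction l generalizing init with
  | nil => simp
  | cons c t ih =>
      by_cases hc : c ∈ charactersToEscape <;> simp [ih, hc]

theorem esc_compose (l : List Char) :
    List.flatMap (fun c => if c = '"' then ['\\', '"'] else [c])
      (List.flatMap (fun c => if c = '\\' then ['\\', '\\'] else [c]) l)
      = List.flatMap (fun c => if c ∈ charactersToEscape then ['\\', c] else [c]) l := by
  induction l with
  | nil => simp
  | cons c t ih =>
      by_cases h1 : c = '\\'
      · simp [h1, ih, charactersToEscape]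
      · by_cases h2 : c = '"' <;> simp [h1, h2, ih, charactersToEscape]

-- ===== VERDICT (by name: the statement is the Claim_ definition above) =====
theorem addJsonStr_spec : Claim_equal_addJsonStr := by
  intro v _
  unfold Spec_addJsonStr addJsonStr addJsonStr_alt
  apply String.ext
  simp only [PySem.Str.toList_replace, String.toList_append, String.toList_ofList]
  rw [show ("\\" : String).toList = ['\\'] from rfl,
      show ("\\\\" : String).toList = ['\\', '\\'] from rfl,
      show ("\"" : String).toList = ['"'] from rfl,
      show ("\\\"" : String).toList = ['\\', '"'] from rfl,
      show (", " : String).toList = [',', ' '] from rfl]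
  rw [foldl_escape]
  rw [replace_single, replace_single, esc_compose]
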